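-- pv_equiv track=rewrite | github.com/chriscahill88/DPLL | DPLLImp.py | _select_literal
-- ===== SOURCE A (Python) =====
-- def _select_literal(clauses, assignment):
--     # Count the occurrences of each literal
--     literal_counts = {}
--
--     for clause in clauses:
--         for literal in clause:
--             if literal not in assignment:
--                 if literal in literal_counts:
--                     literal_counts[literal] += 1
--                 else:
--                     literal_counts[literal] = 1
--
--     # Sort the literals by their occurrence count in descending order
--     sorted_literals = sorted(literal_counts, key=lambda x: literal_counts[x], reverse=True)
--
--     # Select the first unassigned literal
--     for literal in sorted_literals:
--         if literal not in assignment: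
--             return literal
--
--     return None
-- ===== SOURCE B (Python) =====
-- def _select_literal(clauses, assignment):
--     # Phase 1: distinct unassigned literals in first-encountered order.
--     candidates = []
--     for clause in clauses:
--         for literal in clause:
--             if literal not in assignment and literal not in candidates:
--                 candidates.append(literal)
--     # Phase 2: for each candidate, re-scan the clauses to count its
--     # occurrences; keep the first candidate with the strictly highest count.
--     best = None
--     best_count = 0
--     for literal in candidates:
--         count = 0
--         for clause in clauses:
--             count += clause.count(literal)
--         if best is None or count > best_count:
--             best = literal
--             best_count = count
--     return best
-- ===== Notes on version B (the rewrite author's own statement) =====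
-- stated objective: alternative
-- what changed: A builds an occurrence-count dict over unassigned literals, stable-sorts the keys by count descending and returns the first; B never builds or sorts a table: it collects the distinct unassigned literals in first-seen order, then re-scans the clauses per candidate keeping the first strictly-best count.
import Mathlib
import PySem

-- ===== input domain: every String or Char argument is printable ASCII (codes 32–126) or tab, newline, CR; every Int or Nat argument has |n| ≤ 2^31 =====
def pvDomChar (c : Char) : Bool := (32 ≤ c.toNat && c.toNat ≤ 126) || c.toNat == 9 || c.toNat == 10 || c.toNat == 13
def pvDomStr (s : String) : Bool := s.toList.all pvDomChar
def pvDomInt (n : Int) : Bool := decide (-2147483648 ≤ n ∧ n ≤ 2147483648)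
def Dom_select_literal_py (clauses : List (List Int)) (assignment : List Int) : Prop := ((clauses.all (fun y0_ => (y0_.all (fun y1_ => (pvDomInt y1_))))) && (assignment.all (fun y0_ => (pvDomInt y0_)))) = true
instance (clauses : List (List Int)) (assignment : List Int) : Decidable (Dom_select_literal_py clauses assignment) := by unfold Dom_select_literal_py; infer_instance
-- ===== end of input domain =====

-- B re-implements A with a two-phase scan (first-seen candidates, then per-candidate recount)
-- instead of A's count-dict + stable descending sort; same return value, no speed claim.

-- ===== PORT A =====
-- A: count occurrences of each unassigned literal in an insertion-ordered dict,
-- sort the keys by count descending (stable), return the first unassigned one.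
def select_literal_py (clauses : List (List Int)) (assignment : List Int) : Option Int :=
  let counts : PySem.Dict Int Int :=
    clauses.foldl (fun d clause =>
      clause.foldl (fun d lit =>
        if assignment.contains lit then d
        else if d.contains lit then d.insert lit (d.getD lit 0 + 1)
        else d.insert lit 1) d) PySem.Dict.empty
  -- literal_counts[x] in the sort key: the key is always present, ported as getD _ 0
  let sortedLits := PySem.List.sorted counts.keys (fun x => counts.getD x 0) true
  sortedLits.find? (fun lit => !assignment.contains lit)

-- ===== PORT B =====
-- B phase 2 helper: count occurrences of lit over all clauses
def pvCount (clauses : List (List Int)) (lit : Int) : Int :=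
  clauses.foldl (fun n clause => n + (clause.count lit : Int)) 0

-- B phase 2 loop body: update (best, best_count) if this candidate counts strictly higher
def pvBestStep (clauses : List (List Int)) (best : Option Int × Int) (lit : Int) : Option Int × Int :=
  let c := pvCount clauses lit
  match best with
  | (none, _) => (some lit, c)
  | (some b, bc) => if bc < c then (some lit, c) else (some b, bc)

def select_literal_py_alt (clauses : List (List Int)) (assignment : List Int) : Option Int :=
  let candidates : PySem.Set Int :=
    clauses.foldl (fun s clause =>
      clause.foldl (fun s lit =>
        if assignment.contains lit then s else PySem.Set.add s lit) s) PySem.Set.empty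
  (candidates.foldl (pvBestStep clauses) ((none : Option Int), (0 : Int))).1

-- ===== PRECONDITION & SPEC =====
def Spec_select_literal_py (clauses : List (List Int)) (assignment : List Int) (out : Option Int) : Prop := out = select_literal_py_alt clauses assignment
instance (clauses : List (List Int)) (assignment : List Int) (out : Option Int) : Decidable (Spec_select_literal_py clauses assignment out) := by unfold Spec_select_literal_py; infer_instance

-- ===== CLAIM (what is proved, stated in full; the proofs are below) =====
def Claim_equal_select_literal_py : Prop := ∀ (clauses : List (List Int)) (assignment : List Int), Dom_select_literal_py clauses assignment → Spec_select_literal_py clauses assignment (select_literal_py clauses assignment)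


-- ===== LEMMAS AND PROOFS =====

-- proof-side step function: one step of Python max(..) with first-extremal tie-break
def pvMaxStep (key : Int → Int) (acc : Option Int) (x : Int) : Option Int :=
  match acc with
  | none => some x
  | some m => if key m < key x then some x else some m

lemma max?_eq_foldl_pvMaxStep (xs : List Int) (key : Int → Int) :
    PySem.List.max? xs key = xs.foldl (pvMaxStep key) none := by
  unfold PySem.List.max?
  exact PySem.List.foldl_congr_mem _ _ _ _ (fun acc x _ => by cases acc <;> rfl)

-- A's two dict-update branches are a single counter update when the literal is unassigned.
lemma stepA_eq (assignment : List Int) (d : PySem.Dict Int Int) (lit : Int) :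
    (if assignment.contains lit then d
     else if d.contains lit then d.insert lit (d.getD lit 0 + 1)
     else d.insert lit 1)
    = if (!assignment.contains lit) then d.insert lit (d.getD lit 0 + 1) else d := by
  cases h : assignment.contains lit
  · simp only [Bool.not_false, if_true]
    cases h2 : d.contains lit
    · simp [PySem.Dict.getD_of_not_contains d 0 h2]
    · rfl
  · simp

-- A's dict is the Counter of the unassigned literals of the flattened clause list.
lemma countsA_eq_counter (clauses : List (List Int)) (assignment : List Int) :
    clauses.foldl (fun d clause =>
      clause.foldl (fun d lit =>
        if assignment.contains lit then d
        else if d.contains lit then d.insert lit (d.getD lit 0 + 1)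
        else d.insert lit 1) d) PySem.Dict.empty
    = PySem.Dict.counter (clauses.flatten.filter (fun lit => !assignment.contains lit)) := by
  rw [← List.foldl_flatten]
  rw [PySem.List.foldl_congr_mem _ _
        (fun d lit => if (!assignment.contains lit) then d.insert lit (d.getD lit 0 + 1) else d) _
        (fun acc x _ => stepA_eq assignment acc x)]
  rw [PySem.List.foldl_if_eq_foldl_filter, PySem.Dict.foldl_insert_getD_add_one_eq_counter]

-- B's candidate set is the dedup of the same filtered flattened list.
lemma candidates_eq_ofList (clauses : List (List Int)) (assignment : List Int) :
    clauses.foldl (fun s clause =>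
      clause.foldl (fun s lit =>
        if assignment.contains lit then s else PySem.Set.add s lit) s) PySem.Set.empty
    = PySem.Set.ofList (clauses.flatten.filter (fun lit => !assignment.contains lit)) := by
  rw [← List.foldl_flatten]
  rw [PySem.List.foldl_congr_mem _ _
        (fun s lit => if (!assignment.contains lit) then PySem.Set.add s lit else s) _
        (by intro acc x _; cases h : assignment.contains x <;> simp only [h] <;> rfl)]
  rw [PySem.List.foldl_if_eq_foldl_filter, PySem.Set.ofList_eq_foldl]
  rfl

lemma head?_insertBy (before : Int → Int → Bool) (x : Int) (acc : List Int) :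
    (PySem.List.insertBy before x acc).head? =
      (match acc.head? with
       | none => some x
       | some y => if before x y then some x else some y) := by
  cases acc with
  | nil => rfl
  | cons y ys =>
    simp only [PySem.List.insertBy, List.head?_cons]
    split <;> simp

lemma foldl_insertBy_head? (before : Int → Int → Bool) (xs : List Int) :
    ∀ acc : List Int,
    (xs.foldl (fun a x => PySem.List.insertBy before x a) acc).head?
    = xs.foldl (fun o x =>
        match o with
        | none => some x
        | some y => if before x y then some x else some y) acc.head? := by
  induction xs with
  | nil => intro acc; rfl
  | cons x t ih =>
    intro acc
    simp only [List.foldl_cons]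
    rw [ih, head?_insertBy]

-- the head of a stable descending sort is the first element with maximal key
lemma head_sorted_rev_eq_max? (xs : List Int) (key : Int → Int) :
    (PySem.List.sorted xs key true).head? = PySem.List.max? xs key := by
  rw [PySem.List.sorted_rev_eq_foldl_insertBy, foldl_insertBy_head?,
      max?_eq_foldl_pvMaxStep]
  apply PySem.List.foldl_congr_mem
  intro o x _
  cases o with
  | none => rfl
  | some m => by_cases h : key m < key x <;> simp [pvMaxStep, h]

lemma max?_fold_congr (k1 k2 : Int → Int) (xs : List Int) : ∀ (o : Option Int),
    (∀ x ∈ xs, k1 x = k2 x) → (∀ m, o = some m → k1 m = k2 m) →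
    xs.foldl (pvMaxStep k1) o = xs.foldl (pvMaxStep k2) o := by
  induction xs with
  | nil => intros; rfl
  | cons x t ih =>
    intro o hx ho
    have hx' : ∀ y ∈ t, k1 y = k2 y := fun y hy => hx y (List.mem_cons_of_mem _ hy)
    have hxx : k1 x = k2 x := hx x List.mem_cons_self
    simp only [List.foldl_cons]
    cases o with
    | none =>
      exact ih (some x) hx' (by intro m hm; cases hm; exact hxx)
    | some m =>
      have hm := ho m rfl
      by_cases hc : k1 m < k1 x
      · have hc2 : k2 m < k2 x := by rw [← hm, ← hxx]; exact hc
        simp only [pvMaxStep, hc, hc2, if_true]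
        exact ih (some x) hx' (by intro n hn; cases hn; exact hxx)
      · have hc2 : ¬ k2 m < k2 x := by rw [← hm, ← hxx]; exact hc
        simp only [pvMaxStep, hc, hc2, if_false]
        exact ih (some m) hx' (by intro n hn; cases hn; exact hm)

-- max? only looks at the key on members
lemma max?_congr (xs : List Int) (k1 k2 : Int → Int) (h : ∀ x ∈ xs, k1 x = k2 x) :
    PySem.List.max? xs k1 = PySem.List.max? xs k2 := by
  rw [max?_eq_foldl_pvMaxStep, max?_eq_foldl_pvMaxStep]
  exact max?_fold_congr k1 k2 xs none h (by intro m hm; cases hm)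

lemma bfold_aux (clauses : List (List Int)) (cands : List Int) :
    ∀ (o : Option Int) (c : Int),
    (o = none ∨ ∃ m, o = some m ∧ c = pvCount clauses m) →
    (cands.foldl (pvBestStep clauses) (o, c)).1
    = cands.foldl (pvMaxStep (pvCount clauses)) o := by
  induction cands with
  | nil => intro o c _; rfl
  | cons x t ih =>
    intro o c h
    simp only [List.foldl_cons]
    cases o with
    | none => exact ih (some x) (pvCount clauses x) (Or.inr ⟨x, rfl, rfl⟩)
    | some m =>
      obtain ⟨m', hm', hc⟩ := h.resolve_left (by simp)
      cases hm'
      subst hc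
      by_cases hlt : pvCount clauses m < pvCount clauses x
      · simp only [pvBestStep, pvMaxStep, hlt, if_true]
        exact ih (some x) (pvCount clauses x) (Or.inr ⟨x, rfl, rfl⟩)
      · simp only [pvBestStep, pvMaxStep, hlt, if_false]
        exact ih (some m) (pvCount clauses m) (Or.inr ⟨m, rfl, rfl⟩)

-- B's best/best_count fold computes max? under pvCount
lemma bfold_eq_max? (clauses : List (List Int)) (cands : List Int) :
    (cands.foldl (pvBestStep clauses) ((none : Option Int), (0 : Int))).1
    = PySem.List.max? cands (pvCount clauses) := by
  rw [max?_eq_foldl_pvMaxStep]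
  exact bfold_aux clauses cands none 0 (Or.inl rfl)

lemma find?_eq_head? (p : Int → Bool) (xs : List Int) (h : ∀ x ∈ xs, p x = true) :
    xs.find? p = xs.head? := by
  cases xs with
  | nil => rfl
  | cons x t => simp [List.find?, h x (List.mem_cons_self)]

-- ===== VERDICT (by name: the statement is the Claim_ definition above) =====
theorem select_literal_py_spec : Claim_equal_select_literal_py := by
  intro clauses assignment _
  simp only [Spec_select_literal_py, select_literal_py, select_literal_py_alt]
  set F := clauses.flatten.filter (fun lit => !assignment.contains lit)
  rw [countsA_eq_counter, candidates_eq_ofList, PySem.Dict.keys_counter, bfold_eq_max?]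
  have hmem : ∀ x ∈ PySem.Set.ofList F, (!assignment.contains x) = true := by
    intro x hx
    exact (List.mem_filter.mp ((PySem.Set.mem_ofList F x).mp hx)).2
  rw [find?_eq_head? _ _ (fun x hx => hmem x ((PySem.List.mem_sorted _ _ _ x).mp hx))]
  rw [head_sorted_rev_eq_max?]
  apply max?_congr
  intro k hk
  have hp : (!assignment.contains k) = true :=
    (List.mem_filter.mp ((PySem.Set.mem_ofList F k).mp hk)).2
  rw [PySem.Dict.getD_counter, List.count_filter (p := fun lit => !assignment.contains lit) hp, pvCount, PySem.List.foldl_add,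
      List.count_flatten]
  rw [Nat.cast_list_sum, List.map_map, zero_add]
  rfl
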